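-- pv_equiv track=rewrite | github.com/m-murdoch/Matt-Paul-Research | Week 5/Shadows.py | shadows
-- ===== SOURCE A (Python) =====
-- import math
--
-- def shadows(A, T):
--     # we assume all points are in the sun to start
--     s = [True]*len(A)
--     for i in range(len(A)):
--         # shadow is the end point of i's shadow
--         shadow = i+math.floor(A[i]/T)
--         if shadow > len(A):
--             # avoids out of bounds errors
--             shadow = len(A)
--         # examine all points within i's shadow
--         for j in range(i+1, shadow):
--             # is A[j] outside the shadow
--             if A[j] >= A[i]-T*(j-i):
--                 # j is now the point casting shadows and becomes i
--                 i = j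
--                 break
--             else:
--                 s[j] = False
--     return s
-- ===== SOURCE B (Python) =====
-- def shadows(A, T):
--     # one left-to-right pass with a monotonic stack of (key, cummax-reach):
--     # key = A[i] + T*i decreases down the shadow chain; cummax tracks how far
--     # any surviving caster's shadow reaches.
--     s = []
--     stack = []  # each entry: (A[i] + T*i, max shadow-end over this entry and those below)
--     for j, a in enumerate(A):
--         c = a + T * j
--         while stack and stack[-1][0] <= c:
--             stack.pop()
--         s.append(not (stack and stack[-1][1] > j))
--         r = j + a // T
--         stack.append((c, r if not stack else max(stack[-1][1], r)))
--     return s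
-- ===== Notes on version B (the rewrite author's own statement) =====
-- stated objective: alternative
-- what changed: Replaces A's nested per-caster forward-marking loops by a single left-to-right pass with a monotonic stack keyed on A[i]+T*i that carries a running maximum of shadow reaches, deciding each point's shadow status on arrival.
import Mathlib
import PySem

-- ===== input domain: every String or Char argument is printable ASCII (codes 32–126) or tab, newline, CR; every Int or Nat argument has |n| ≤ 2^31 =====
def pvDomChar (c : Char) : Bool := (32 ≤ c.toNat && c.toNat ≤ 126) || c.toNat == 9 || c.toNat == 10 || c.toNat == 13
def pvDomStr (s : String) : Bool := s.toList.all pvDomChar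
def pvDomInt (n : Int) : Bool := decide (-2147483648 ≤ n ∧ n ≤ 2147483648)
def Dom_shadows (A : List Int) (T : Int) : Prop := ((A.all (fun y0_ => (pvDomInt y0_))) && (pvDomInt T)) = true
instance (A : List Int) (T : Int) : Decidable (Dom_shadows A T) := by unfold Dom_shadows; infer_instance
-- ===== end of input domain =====

-- B replaces A's nested per-caster marking loops by a single monotonic-stack pass (alternative algorithm).


-- ===== PORT A =====
-- inner loop 'for j in range(i+1, shadow): if A[j] >= A[i]-T*(j-i): break else: s[j] = False'
-- (the Python's 'i = j' before the break rebinds a for-variable that the next outer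
--  iteration resets, so it has no effect and only the break itself is ported)
def shadowsLoopA (A : List Int) (T : Int) (i : Int) : List Int → List Bool → List Bool
  | [], s => s
  | j :: js, s =>
      if PySem.List.pyGetD A j 0 ≥ PySem.List.pyGetD A i 0 - T * (j - i) then s
      else shadowsLoopA A T i js (PySem.List.pySetD s j false)

-- math.floor(A[i]/T) is ported as PySem.Int.floordiv: exact on Dom (|values| ≤ 2^31,
-- so the float quotient cannot round across an integer); T = 0 is excluded by Pre_.
def shadows (A : List Int) (T : Int) : List Bool :=
  let s := List.replicate A.length true
  (PySem.List.pyRange 0 (PySem.List.len A) 1).foldl (fun s i =>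
    let shadow := i + PySem.Int.floordiv (PySem.List.pyGetD A i 0) T
    let shadow := if shadow > PySem.List.len A then PySem.List.len A else shadow
    shadowsLoopA A T i (PySem.List.pyRange (i + 1) shadow 1) s) s

-- ===== PORT B =====
-- 'while stack and stack[-1][0] <= c: stack.pop()'  (stack top = list head here)
def altPop (c : Int) : List (Int × Int) → List (Int × Int)
  | [] => []
  | (x, m) :: st => if x ≤ c then altPop c st else (x, m) :: st

-- the enumerate loop of Source B; each stack entry is (A[i]+T*i, running max shadow reach)
def altGo (T : Int) : List (Int × Int) → List (Int × Int) → List Bool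
  | [], _ => []
  | (j, a) :: rest, stack =>
      let c := a + T * j
      let st := altPop c stack
      let shaded := match st with
        | [] => false
        | (_, m) :: _ => decide (j < m)
      let r := j + PySem.Int.floordiv a T
      let cm := match st with
        | [] => r
        | (_, m) :: _ => max m r
      (!shaded) :: altGo T rest ((c, cm) :: st)

def shadows_alt (A : List Int) (T : Int) : List Bool :=
  altGo T (PySem.List.enumerate A 0) []

-- ===== PRECONDITION & SPEC =====
-- Pre_ excludes T = 0, on which Python A raises ZeroDivisionError (so does B).
def Pre_shadows (A : List Int) (T : Int) : Prop := T ≠ 0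
instance (A : List Int) (T : Int) : Decidable (Pre_shadows A T) := by unfold Pre_shadows; infer_instance
def pvWitness_shadows : List Int × Int := ([3, 1, 0, 2], 1)

def Spec_shadows (A : List Int) (T : Int) (out : List Bool) : Prop := out = shadows_alt A T
instance (A : List Int) (T : Int) (out : List Bool) : Decidable (Spec_shadows A T out) := by unfold Spec_shadows; infer_instance

-- ===== CLAIM (what is proved, stated in full; the proofs are below) =====
def Claim_equal_shadows : Prop := ∀ (A : List Int) (T : Int), Dom_shadows A T → Pre_shadows A T → Spec_shadows A T (shadows A T)

-- ===== LEMMAS AND PROOFS =====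

-- key of point i: A[i] + T*i  (A[j] >= A[i] - T*(j-i)  ⟺  key j ≥ key i)
def Cv (A : List Int) (T : Int) (i : Nat) : Int := A.getD i 0 + T * i
-- reach of point i: i + A[i] // T, the end of i's shadow
def rv (A : List Int) (T : Int) (i : Nat) : Int := (i : Int) + PySem.Int.floordiv (A.getD i 0) T
-- chain condition: every point strictly between i and m (exclusive) has smaller key
def chTo (A : List Int) (T : Int) (i m : Nat) : Prop := ∀ k, k < m → i < k → Cv A T k < Cv A T i
def chB (A : List Int) (T : Int) (i m : Nat) : Bool :=
  (List.range m).all fun k => !decide (i < k) || decide (Cv A T k < Cv A T i)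
-- i shades j in A's sense
def Wp (A : List Int) (T : Int) (i j : Nat) : Prop := i < j ∧ chTo A T i (j + 1) ∧ (j : Int) < rv A T i
def WB (A : List Int) (T : Int) (i j : Nat) : Bool :=
  decide (i < j) && chB A T i (j + 1) && decide ((j : Int) < rv A T i)
-- the common pointwise description of both programs' output at j
def sB (A : List Int) (T : Int) (j : Nat) : Bool := !((List.range j).any fun i => WB A T i j)

theorem chB_iff (A : List Int) (T : Int) (i m : Nat) : chB A T i m = true ↔ chTo A T i m := by
  simp only [chB, List.all_eq_true, List.mem_range, Bool.or_eq_true, Bool.not_eq_true',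
    decide_eq_false_iff_not, decide_eq_true_eq, chTo]
  exact forall_congr' fun k => by tauto

theorem WB_iff (A : List Int) (T : Int) (i j : Nat) : WB A T i j = true ↔ Wp A T i j := by
  simp [WB, Wp, chB_iff, and_assoc]

theorem sB_iff (A : List Int) (T : Int) (j : Nat) :
    sB A T j = true ↔ ¬ ∃ i, i < j ∧ Wp A T i j := by
  simp [sB, List.mem_range, WB_iff]

-- ---------- B side: the records list modelled abstractly ----------

-- indices still on the stack after processing the first m points (head = top = largest index)
def recsL (A : List Int) (T : Int) : Nat → List Nat
  | 0 => []
  | m + 1 => m :: (recsL A T m).dropWhile (fun i => decide (Cv A T i ≤ Cv A T m))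

-- the stack altGo maintains, as a function of the index list
def stkOf (A : List Int) (T : Int) : List Nat → List (Int × Int)
  | [] => []
  | i :: l => (Cv A T i,
      match stkOf A T l with
      | [] => rv A T i
      | (_, m) :: _ => max m (rv A T i)) :: stkOf A T l

theorem dropWhile_mem_of_sorted (A : List Int) (T : Int) (c : Int) :
    ∀ l : List Nat, l.Pairwise (fun a b => Cv A T a < Cv A T b) →
      ∀ i, (i ∈ l.dropWhile (fun i => decide (Cv A T i ≤ c)) ↔ i ∈ l ∧ c < Cv A T i) := by
  intro l hl i
  induction l with
  | nil => simp
  | cons x t ih =>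
    rcases List.pairwise_cons.mp hl with ⟨hx, ht⟩
    by_cases hxc : Cv A T x ≤ c
    · rw [List.dropWhile_cons_of_pos (by simpa using hxc), ih ht]
      constructor
      · rintro ⟨hi, hc⟩; exact ⟨List.mem_cons_of_mem _ hi, hc⟩
      · rintro ⟨hi, hc⟩
        rcases List.mem_cons.mp hi with rfl | hi
        · omega
        · exact ⟨hi, hc⟩
    · rw [List.dropWhile_cons_of_neg (by simpa using hxc)]
      push Not at hxc
      constructor
      · intro hi
        refine ⟨hi, ?_⟩
        rcases List.mem_cons.mp hi with rfl | hi
        · exact hxc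
        · exact lt_trans hxc (hx i hi)
      · exact fun h => h.1

theorem recsL_inv (A : List Int) (T : Int) (m : Nat) :
    (∀ i, i ∈ recsL A T m ↔ (i < m ∧ chTo A T i m)) ∧
      (recsL A T m).Pairwise (fun a b => b < a ∧ Cv A T a < Cv A T b) := by
  induction m with
  | zero => simp [recsL, chTo]
  | succ m ih =>
    rcases ih with ⟨hmem, hpw⟩
    have hpwC : (recsL A T m).Pairwise (fun a b => Cv A T a < Cv A T b) :=
      hpw.imp (fun h => h.2)
    have hdrop := dropWhile_mem_of_sorted A T (Cv A T m) (recsL A T m) hpwC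
    have hmem' : ∀ i, i ∈ (recsL A T m).dropWhile (fun i => decide (Cv A T i ≤ Cv A T m)) ↔
        (i < m ∧ chTo A T i m ∧ Cv A T m < Cv A T i) := by
      intro i; rw [hdrop i, hmem i]; tauto
    constructor
    · intro i
      simp only [recsL, List.mem_cons, hmem']
      constructor
      · rintro (rfl | ⟨h1, h2, h3⟩)
        · exact ⟨by omega, fun k hk hik => by omega⟩
        · refine ⟨by omega, fun k hk hik => ?_⟩
          rcases Nat.lt_succ_iff_lt_or_eq.mp hk with hk' | rfl
          · exact h2 k hk' hik
          · exact h3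
      · rintro ⟨h1, h2⟩
        rcases Nat.lt_succ_iff_lt_or_eq.mp h1 with h1' | rfl
        · exact Or.inr ⟨h1', fun k hk hik => h2 k (by omega) hik, h2 m (by omega) h1'⟩
        · exact Or.inl rfl
    · rw [recsL, List.pairwise_cons]
      refine ⟨fun b hb => ?_, List.Pairwise.sublist (List.dropWhile_sublist _) hpw⟩
      rcases (hmem' b).mp hb with ⟨h1, _, h3⟩
      exact ⟨h1, h3⟩

theorem altPop_stkOf (A : List Int) (T : Int) (c : Int) :
    ∀ l : List Nat, altPop c (stkOf A T l) = stkOf A T (l.dropWhile (fun i => decide (Cv A T i ≤ c))) := by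
  intro l
  induction l with
  | nil => simp [stkOf, altPop]
  | cons x t ih =>
    by_cases hxc : Cv A T x ≤ c
    · rw [List.dropWhile_cons_of_pos (by simpa using hxc), ← ih]
      simp [stkOf, altPop, hxc]
    · rw [List.dropWhile_cons_of_neg (by simpa using hxc)]
      simp [stkOf, altPop, hxc]

theorem stkOf_head (A : List Int) (T : Int) :
    ∀ l : List Nat, l ≠ [] → ∃ hd tl, stkOf A T l = hd :: tl ∧
      ∀ j : Int, (j < hd.2 ↔ ∃ i ∈ l, j < rv A T i) := by
  intro l
  induction l with
  | nil => simp
  | cons x t ih =>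
    intro _
    cases t with
    | nil =>
      refine ⟨(Cv A T x, rv A T x), [], rfl, fun j => ?_⟩
      simp
    | cons y u =>
      rcases ih (by simp) with ⟨hd', tl', heq, hiff⟩
      obtain ⟨c', m'⟩ := hd'
      refine ⟨(Cv A T x, max m' (rv A T x)), (c', m') :: tl', ?_, fun j => ?_⟩
      · rw [show stkOf A T (x :: y :: u) = (Cv A T x,
            match stkOf A T (y :: u) with
            | [] => rv A T x
            | (_, m) :: _ => max m (rv A T x)) :: stkOf A T (y :: u) from rfl, heq]
      · have h2 := hiff j
        simp only [List.mem_cons] at h2 ⊢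
        simp only [lt_max_iff]
        rw [h2]
        constructor
        · rintro (⟨i, hi, hj⟩ | hj)
          · exact ⟨i, Or.inr hi, hj⟩
          · exact ⟨x, Or.inl rfl, hj⟩
        · rintro ⟨i, (rfl | hi), hj⟩
          · exact Or.inr hj
          · exact Or.inl ⟨i, hi, hj⟩

theorem stkOf_nil_iff (A : List Int) (T : Int) : ∀ l : List Nat, stkOf A T l = [] ↔ l = [] := by
  intro l; cases l <;> simp [stkOf]

theorem chTo_succ (A : List Int) (T : Int) (i m : Nat) (him : i < m) :
    chTo A T i (m + 1) ↔ (chTo A T i m ∧ Cv A T m < Cv A T i) := by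
  constructor
  · exact fun h => ⟨fun k hk hik => h k (by omega) hik, h m (by omega) him⟩
  · rintro ⟨h1, h2⟩ k hk hik
    rcases Nat.lt_succ_iff_lt_or_eq.mp hk with hk' | rfl
    · exact h1 k hk' hik
    · exact h2

-- membership in the popped stack  =  "i shades everything up to and including m"
theorem memL' (A : List Int) (T : Int) (m : Nat) (i : Nat) :
    i ∈ (recsL A T m).dropWhile (fun i => decide (Cv A T i ≤ Cv A T m)) ↔
      (i < m ∧ chTo A T i (m + 1)) := by
  rcases recsL_inv A T m with ⟨hmem, hpw⟩
  rw [dropWhile_mem_of_sorted A T (Cv A T m) _ (hpw.imp fun h => h.2) i, hmem i]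
  constructor
  · rintro ⟨⟨h1, h2⟩, h3⟩
    exact ⟨h1, (chTo_succ A T i m h1).mpr ⟨h2, h3⟩⟩
  · rintro ⟨h1, h2⟩
    rcases (chTo_succ A T i m h1).mp h2 with ⟨h2', h3⟩
    exact ⟨⟨h1, h2'⟩, h3⟩

theorem altGo_spec (A : List Int) (T : Int) :
    ∀ (cnt m : Nat),
      altGo T ((List.range' m cnt).map (fun j : Nat => ((j : Int), A.getD j 0))) (stkOf A T (recsL A T m))
        = (List.range' m cnt).map (fun j => sB A T j) := by
  intro cnt
  induction cnt with
  | zero => intro m; simp [altGo]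
  | succ cnt ih =>
    intro m
    rw [List.range'_succ, List.map_cons, List.map_cons]
    have hc : A.getD m 0 + T * (m : Int) = Cv A T m := rfl
    have hpop : altPop (Cv A T m) (stkOf A T (recsL A T m)) =
        stkOf A T ((recsL A T m).dropWhile (fun i => decide (Cv A T i ≤ Cv A T m))) :=
      altPop_stkOf A T (Cv A T m) (recsL A T m)
    have hshaded : ∀ sh : Bool,
        (sh = true ↔ ∃ i, i < m ∧ Wp A T i m) → (!sh) = sB A T m := by
      intro sh hiff
      have h2 := sB_iff A T m
      cases hsb : sB A T m <;> cases hs : sh <;> simp_all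
    -- the existential over the popped stack
    have hex : (∃ i, i < m ∧ Wp A T i m) ↔
        ∃ i ∈ (recsL A T m).dropWhile (fun i => decide (Cv A T i ≤ Cv A T m)), (m : Int) < rv A T i := by
      constructor
      · rintro ⟨i, hi, hW⟩
        exact ⟨i, (memL' A T m i).mpr ⟨hW.1, hW.2.1⟩, hW.2.2⟩
      · rintro ⟨i, hi, hr⟩
        rcases (memL' A T m i).mp hi with ⟨h1, h2⟩
        exact ⟨i, h1, h1, h2, hr⟩
    simp only [altGo, hc, hpop]
    set L' := (recsL A T m).dropWhile (fun i => decide (Cv A T i ≤ Cv A T m)) with hL'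
    have hrec : recsL A T (m + 1) = m :: L' := rfl
    cases hst : stkOf A T L' with
    | nil =>
      have hL'nil : L' = [] := (stkOf_nil_iff A T L').mp hst
      have hstk : stkOf A T (recsL A T (m + 1)) =
          [(Cv A T m, (m : Int) + PySem.Int.floordiv (A.getD m 0) T)] := by
        rw [hrec, hL'nil]; rfl
      have htail : altGo T (List.map (fun j : Nat => ((j : Int), A.getD j 0)) (List.range' (m + 1) cnt))
          [(Cv A T m, (m : Int) + PySem.Int.floordiv (A.getD m 0) T)] =
          List.map (fun j => sB A T j) (List.range' (m + 1) cnt) := by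
        rw [← hstk]; exact ih (m + 1)
      have hhead : (!false) = sB A T m := by
        apply hshaded
        constructor
        · intro h; exact absurd h (by simp)
        · intro hP
          rcases hex.mp hP with ⟨i, hi, _⟩
          rw [hL'nil] at hi
          simp at hi
      exact List.cons_eq_cons.mpr ⟨hhead, htail⟩
    | cons hd tl =>
      obtain ⟨c2, m2⟩ := hd
      have hL'ne : L' ≠ [] := fun h => by rw [h] at hst; simp [stkOf] at hst
      rcases stkOf_head A T L' hL'ne with ⟨hd2, tl2, heq2, hiff2⟩
      rw [hst] at heq2
      injection heq2 with h21 h22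
      rw [← h21] at hiff2
      have hiffm := hiff2 (m : Int)
      have hhead : (!(decide ((m : Int) < m2))) = sB A T m := by
        apply hshaded
        constructor
        · intro h
          exact hex.mpr ((hiffm).mp (of_decide_eq_true h))
        · intro hP
          exact decide_eq_true ((hiffm).mpr (hex.mp hP))
      have hstk : stkOf A T (recsL A T (m + 1)) =
          (Cv A T m, max m2 ((m : Int) + PySem.Int.floordiv (A.getD m 0) T)) :: (c2, m2) :: tl := by
        have h1 : stkOf A T (m :: L') = (Cv A T m,
            match stkOf A T L' with
            | [] => rv A T m
            | (_, mm) :: _ => max mm (rv A T m)) :: stkOf A T L' := rfl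
        rw [hrec, h1, hst]
        rfl
      have htail : altGo T (List.map (fun j : Nat => ((j : Int), A.getD j 0)) (List.range' (m + 1) cnt))
          ((Cv A T m, max m2 ((m : Int) + PySem.Int.floordiv (A.getD m 0) T)) :: (c2, m2) :: tl) =
          List.map (fun j => sB A T j) (List.range' (m + 1) cnt) := by
        rw [← hstk]; exact ih (m + 1)
      exact List.cons_eq_cons.mpr ⟨hhead, htail⟩

theorem alt_eq_map (A : List Int) (T : Int) :
    shadows_alt A T = (List.range A.length).map (fun j => sB A T j) := by
  have h0 : PySem.List.enumerate A 0 = (List.range A.length).map (fun j : Nat => ((j : Int), A.getD j 0)) := by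
    rw [PySem.List.enumerate_eq_map_pyRange A (0 : Int)]
    simp [PySem.List.len_eq, PySem.List.pyRange_zero_natCast, List.map_map, Function.comp]
  show altGo T (PySem.List.enumerate A 0) [] = _
  rw [h0, List.range_eq_range']
  exact altGo_spec A T A.length 0

-- ---------- A side ----------

-- Bool chain over the closed interval [j0, t]
def chSeg (A : List Int) (T : Int) (i j0 t : Nat) : Bool :=
  (List.range' j0 (t + 1 - j0)).all fun k => decide (Cv A T k < Cv A T i)

theorem pyRange_cast (a : Nat) (b : Int) :
    PySem.List.pyRange (a : Int) b 1 = (List.range' a (b - a).toNat).map (fun k : Nat => (k : Int)) := by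
  rw [PySem.List.pyRange_one, List.range'_eq_map_range, List.map_map]
  apply List.map_congr_left
  intro k _
  simp

theorem loopA_length (A : List Int) (T : Int) (i : Int) :
    ∀ (js : List Int) (s : List Bool), (shadowsLoopA A T i js s).length = s.length := by
  intro js
  induction js with
  | nil => intro s; rfl
  | cons j t ih =>
    intro s
    rw [shadowsLoopA]
    split
    · rfl
    · rw [ih]
      simp [PySem.List.length_pySetD]

theorem cond_iff (A : List Int) (T : Int) (i j0 : Nat) :
    (PySem.List.pyGetD A (j0 : Int) 0 ≥ PySem.List.pyGetD A (i : Int) 0 - T * ((j0 : Int) - (i : Int))) ↔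
      ¬ (Cv A T j0 < Cv A T i) := by
  simp only [PySem.List.pyGetD_natCast, Cv, ge_iff_le, not_lt, mul_sub]
  constructor <;> intro h <;> linarith

theorem loopA_getD (A : List Int) (T : Int) (i : Nat) :
    ∀ (cnt j0 : Nat) (s : List Bool) (t : Nat), t < s.length →
      (shadowsLoopA A T (i : Int) ((List.range' j0 cnt).map (fun k : Nat => (k : Int))) s).getD t true
        = (s.getD t true && !(decide (j0 ≤ t ∧ t < j0 + cnt) && chSeg A T i j0 t)) := by
  intro cnt
  induction cnt with
  | zero =>
    intro j0 s t ht
    simp [shadowsLoopA]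
    omega
  | succ cnt ih =>
    intro j0 s t ht
    rw [List.range'_succ, List.map_cons, shadowsLoopA]
    split
    · rename_i hcond
      have hnlt : ¬ (Cv A T j0 < Cv A T i) := (cond_iff A T i j0).mp hcond
      by_cases hj : j0 ≤ t ∧ t < j0 + (cnt + 1)
      · have hseg : chSeg A T i j0 t = false := by
          apply List.all_eq_false.mpr
          refine ⟨j0, ?_, by simpa using hnlt⟩
          apply List.mem_range'_1.mpr
          omega
        simp [hseg]
      · simp [hj]
    · rename_i hcond
      have hlt : Cv A T j0 < Cv A T i := by
        by_contra h
        exact hcond ((cond_iff A T i j0).mpr h)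
      have hset : PySem.List.pySetD s (j0 : Int) false = s.set j0 false := by
        simp [PySem.List.pySetD_natCast]
      rw [hset, ih (j0 + 1) (s.set j0 false) t (by simpa using ht)]
      by_cases htj : t = j0
      · subst htj
        have h1 : (s.set t false).getD t true = false := by
          rw [List.getD_eq_getElem _ _ (by simpa using ht)]
          simp [List.getElem_set_self (by simpa using ht : t < (s.set t false).length)]
        have h2 : chSeg A T i t t = true := by
          simp only [chSeg]
          have : t + 1 - t = 1 := by omega
          rw [this]
          simp [hlt]
        rw [h1]
        have hd : decide (t ≤ t ∧ t < t + (cnt + 1)) = true := decide_eq_true (by omega)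
        rw [hd, h2]
        simp
      · have h1 : (s.set j0 false).getD t true = s.getD t true := by
          by_cases htl : t < s.length
          · rw [List.getD_eq_getElem _ _ (by simpa using htl), List.getD_eq_getElem _ _ htl]
            simp [List.getElem_set_ne (Ne.symm htj)]
          · omega
        rw [h1]
        by_cases hj0t : j0 < t
        · have hd : decide (j0 + 1 ≤ t ∧ t < j0 + 1 + cnt) = decide (j0 ≤ t ∧ t < j0 + (cnt + 1)) := by
            apply decide_eq_decide.mpr
            omega
          have hseg : chSeg A T i (j0 + 1) t = chSeg A T i j0 t := by
            simp only [chSeg]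
            have hsplit : List.range' j0 (t + 1 - j0) = j0 :: List.range' (j0 + 1) (t + 1 - (j0 + 1)) := by
              have h2 : t + 1 - j0 = (t + 1 - (j0 + 1)) + 1 := by omega
              rw [h2, List.range'_succ]
            rw [hsplit, List.all_cons, decide_eq_true hlt, Bool.true_and]
          rw [hd, hseg]
        · have hd1 : decide (j0 + 1 ≤ t ∧ t < j0 + 1 + cnt) = false := by
            simp; omega
          have hd2 : decide (j0 ≤ t ∧ t < j0 + (cnt + 1)) = false := by
            simp; omega
          rw [hd1, hd2]
          simp

def preS (A : List Int) (T : Int) (m t : Nat) : Bool :=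
  !((List.range m).any fun i => WB A T i t)

theorem chSeg_eq_chB (A : List Int) (T : Int) (m t : Nat) :
    chSeg A T m (m + 1) t = chB A T m (t + 1) := by
  rw [Bool.eq_iff_iff]
  simp only [chSeg, chB, List.all_eq_true, List.mem_range'_1, List.mem_range, Bool.or_eq_true,
    Bool.not_eq_true', decide_eq_false_iff_not, decide_eq_true_eq]
  constructor
  · intro h k hk
    by_cases hmk : m < k
    · exact Or.inr (h k ⟨by omega, by omega⟩)
    · exact Or.inl (by omega)
  · intro h k hk
    rcases h k (by omega) with h' | h'
    · omega
    · exact h'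

-- the A-side outer fold, characterised pointwise
theorem outer_spec (A : List Int) (T : Int) (m : Nat) :
    (((List.range m).map (fun k : Nat => (k : Int))).foldl (fun s i =>
        let shadow := i + PySem.Int.floordiv (PySem.List.pyGetD A i 0) T
        let shadow := if shadow > PySem.List.len A then PySem.List.len A else shadow
        shadowsLoopA A T i (PySem.List.pyRange (i + 1) shadow 1) s)
        (List.replicate A.length true)).length = A.length ∧
    ∀ t, t < A.length →
      (((List.range m).map (fun k : Nat => (k : Int))).foldl (fun s i =>
          let shadow := i + PySem.Int.floordiv (PySem.List.pyGetD A i 0) T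
          let shadow := if shadow > PySem.List.len A then PySem.List.len A else shadow
          shadowsLoopA A T i (PySem.List.pyRange (i + 1) shadow 1) s)
          (List.replicate A.length true)).getD t true = preS A T m t := by
  induction m with
  | zero =>
    refine ⟨by simp, fun t ht => ?_⟩
    simp [preS]
  | succ m ih =>
    rcases ih with ⟨ihlen, ihget⟩
    rw [List.range_succ, List.map_append, List.foldl_append]
    set sm := ((List.range m).map (fun k : Nat => (k : Int))).foldl (fun s i =>
        let shadow := i + PySem.Int.floordiv (PySem.List.pyGetD A i 0) T
        let shadow := if shadow > PySem.List.len A then PySem.List.len A else shadow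
        shadowsLoopA A T i (PySem.List.pyRange (i + 1) shadow 1) s)
        (List.replicate A.length true) with hsm
    simp only [List.map_cons, List.map_nil, List.foldl_cons, List.foldl_nil]
    set q := PySem.Int.floordiv (PySem.List.pyGetD A (m : Int) 0) T with hq
    set sh := if (m : Int) + q > PySem.List.len A then PySem.List.len A else (m : Int) + q with hsh
    have hcast : ((m : Int) + 1) = ((m + 1 : Nat) : Int) := by push_cast; ring
    have hrange : PySem.List.pyRange ((m : Int) + 1) sh 1 =
        (List.range' (m + 1) ((sh - ((m + 1 : Nat) : Int)).toNat)).map (fun k : Nat => (k : Int)) := by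
      rw [hcast, pyRange_cast]
    have hlen2 : (shadowsLoopA A T (m : Int) (PySem.List.pyRange ((m : Int) + 1) sh 1) sm).length
        = A.length := by
      rw [loopA_length, ihlen]
    refine ⟨hlen2, fun t ht => ?_⟩
    rw [hrange, loopA_getD A T m _ (m + 1) sm t (by rw [ihlen]; exact ht), ihget t ht]
    have hrv : rv A T m = (m : Int) + q := by
      simp [rv, hq, PySem.List.pyGetD_natCast]
    have hbounds : (decide (m + 1 ≤ t ∧ t < m + 1 + (sh - ((m + 1 : Nat) : Int)).toNat)
        && chSeg A T m (m + 1) t) = WB A T m t := by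
      rw [Bool.eq_iff_iff]
      simp only [Bool.and_eq_true, decide_eq_true_eq, WB, chSeg_eq_chB]
      have hlenA : PySem.List.len A = (A.length : Int) := by simp [PySem.List.len_eq]
      constructor
      · rintro ⟨⟨h1, h2⟩, h3⟩
        refine ⟨⟨by omega, h3⟩, ?_⟩
        rw [hrv]
        rw [hsh, hlenA] at h2
        split_ifs at h2 with hcap
        · omega
        · omega
      · rintro ⟨⟨h1, h3⟩, h2⟩
        rw [hrv] at h2
        refine ⟨⟨by omega, ?_⟩, h3⟩
        rw [hsh, hlenA]
        split_ifs with hcap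
        · omega
        · omega
    rw [hbounds]
    rw [Bool.eq_iff_iff]
    simp only [preS, List.range_succ, List.any_append, List.any_cons, List.any_nil,
      Bool.and_eq_true, Bool.not_eq_true', Bool.or_eq_false_iff]
    constructor
    · rintro ⟨h1, h2⟩
      exact ⟨h1, by simpa using h2⟩
    · rintro ⟨h1, h2⟩
      exact ⟨h1, by simpa using h2⟩

theorem shadows_eq_map (A : List Int) (T : Int) :
    shadows A T = (List.range A.length).map (fun j => sB A T j) := by
  have hsh : shadows A T = (((List.range A.length).map (fun k : Nat => (k : Int))).foldl (fun s i =>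
      let shadow := i + PySem.Int.floordiv (PySem.List.pyGetD A i 0) T
      let shadow := if shadow > PySem.List.len A then PySem.List.len A else shadow
      shadowsLoopA A T i (PySem.List.pyRange (i + 1) shadow 1) s)
      (List.replicate A.length true)) := by
    show (PySem.List.pyRange 0 (PySem.List.len A) 1).foldl _ _ = _
    rw [show PySem.List.len A = (A.length : Int) by simp [PySem.List.len_eq],
      PySem.List.pyRange_zero_natCast]
  rcases outer_spec A T A.length with ⟨hlen, hget⟩
  rw [hsh]
  apply List.ext_getElem (by rw [List.length_map, List.length_range]; exact hlen)
  intro t h1 h2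
  have h3 : t < A.length := by rw [hlen] at h1; exact h1
  have h4 := hget t h3
  rw [List.getD_eq_getElem _ _ h1] at h4
  rw [h4]
  rw [List.getElem_map, List.getElem_range]
  rw [Bool.eq_iff_iff]
  simp only [preS, sB, Bool.not_eq_true', List.any_eq_false, List.mem_range]
  constructor
  · intro h i hi
    exact h i (by omega)
  · intro h i hi
    by_cases hit : i < t
    · exact h i hit
    · intro hWB
      rcases (WB_iff A T i t).mp hWB with ⟨h', _, _⟩
      omega

-- ===== VERDICT =====
theorem shadows_spec : Claim_equal_shadows := by
  intro A T _ _
  show shadows A T = shadows_alt A T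
  rw [shadows_eq_map, alt_eq_map]
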